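-- pv_equiv track=rewrite | github.com/nikumar1013/my-spotify-data | extract.py | top_tracks_by_artist
-- ===== SOURCE A (Python) =====
-- def top_tracks_by_artist(top_tracks, top_artists):
--     top_tracks_by_artist = {}
--     for artist in top_artists:
--         tracks = []
--         for track in top_tracks:
--             track_artist = top_tracks.get(track)
--             if artist[0] == track_artist:
--                 tracks.append(track[0])
--         if len(tracks) > 0:
--         	top_tracks_by_artist[artist] = tracks
--     return top_tracks_by_artist
-- ===== SOURCE B (Python) =====
-- def top_tracks_by_artist(top_tracks, top_artists):
--     # One pass over the tracks: group track names by their artist value,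
--     # then a single dict lookup per artist.  O(A+T) instead of O(A*T).
--     groups = {}
--     for track, artist_name in top_tracks.items():
--         groups[artist_name] = groups.get(artist_name, []) + [track[0]]
--     result = {}
--     for artist in top_artists:
--         tracks = groups.get(artist[0])
--         if tracks:
--             result[artist] = tracks
--     return result
-- ===== Notes on version B (the rewrite author's own statement) =====
-- stated objective: faster
-- what changed: Instead of scanning all tracks once per artist, B groups track names by artist value in a single pass over the tracks dict and then does one hash lookup per artist.
import Mathlib
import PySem

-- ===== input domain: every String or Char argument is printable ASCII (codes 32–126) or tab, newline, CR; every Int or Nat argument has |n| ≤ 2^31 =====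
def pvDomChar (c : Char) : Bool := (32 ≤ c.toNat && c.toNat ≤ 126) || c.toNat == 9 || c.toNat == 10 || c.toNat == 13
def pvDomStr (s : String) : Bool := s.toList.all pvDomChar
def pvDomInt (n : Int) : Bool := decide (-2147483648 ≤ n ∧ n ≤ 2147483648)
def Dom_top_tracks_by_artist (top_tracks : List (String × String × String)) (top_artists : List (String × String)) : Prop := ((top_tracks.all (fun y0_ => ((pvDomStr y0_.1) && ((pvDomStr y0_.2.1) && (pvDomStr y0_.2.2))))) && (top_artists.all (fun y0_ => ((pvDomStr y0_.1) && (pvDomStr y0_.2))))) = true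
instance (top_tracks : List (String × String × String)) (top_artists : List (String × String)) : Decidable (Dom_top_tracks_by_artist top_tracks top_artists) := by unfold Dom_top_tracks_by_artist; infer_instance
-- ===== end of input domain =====

-- B replaces A's per-artist scan of all tracks by one grouping pass over the tracks dict plus one lookup per artist (faster).

-- ===== PORT A =====
-- the dict parameter top_tracks : dict[(str,str), str] arrives as its (key1, key2, value)
-- items; both ports first rebuild the Python dict (insertion order, overwrite in place) exactly.
def pvAsDict (top_tracks : List (String × String × String)) : PySem.Dict (String × String) String :=
  top_tracks.foldl (fun d t => d.insert (t.1, t.2.1) t.2.2) PySem.Dict.empty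

def top_tracks_by_artist (top_tracks : List (String × String × String)) (top_artists : List (String × String)) : List (String × String × List String) :=
  let d := pvAsDict top_tracks
  let res := top_artists.foldl (fun acc artist =>
    let tracks := d.keys.foldl (fun ts track =>
      if some artist.1 == d.get? track then ts ++ [track.1] else ts) []
    if tracks.length > 0 then acc.insert artist tracks else acc) PySem.Dict.empty
  res.items.map (fun e => (e.1.1, e.1.2, e.2))

-- ===== PORT B =====
def top_tracks_by_artist_alt (top_tracks : List (String × String × String)) (top_artists : List (String × String)) : List (String × String × List String) :=
  let d := pvAsDict top_tracks
  let groups := d.items.foldl (fun g p => g.modify p.2 [] (· ++ [p.1.1])) PySem.Dict.empty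
  let res := top_artists.foldl (fun acc artist =>
    match groups.get? artist.1 with
    | some tracks => if tracks.isEmpty then acc else acc.insert artist tracks
    | none => acc) PySem.Dict.empty
  res.items.map (fun e => (e.1.1, e.1.2, e.2))

-- ===== PRECONDITION & SPEC =====
def Spec_top_tracks_by_artist (top_tracks : List (String × String × String)) (top_artists : List (String × String)) (out : List (String × String × List String)) : Prop := out = top_tracks_by_artist_alt top_tracks top_artists
instance (top_tracks : List (String × String × String)) (top_artists : List (String × String)) (out : List (String × String × List String)) : Decidable (Spec_top_tracks_by_artist top_tracks top_artists out) := by unfold Spec_top_tracks_by_artist; infer_instance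

-- ===== CLAIM (what is proved, stated in full; the proofs are below) =====
def Claim_equal_top_tracks_by_artist : Prop := ∀ (top_tracks : List (String × String × String)) (top_artists : List (String × String)), Dom_top_tracks_by_artist top_tracks top_artists → Spec_top_tracks_by_artist top_tracks top_artists (top_tracks_by_artist top_tracks top_artists)

-- ===== LEMMAS AND PROOFS =====

-- A's inner scan over the keys equals a lookup in B's grouping dict.
lemma pv_tracks_eq (d : PySem.Dict (String × String) String) (hnd : d.keys.Nodup) (n : String) :
    d.keys.foldl (fun ts track => if some n == d.get? track then ts ++ [track.1] else ts) []
      = (d.items.foldl (fun g p => g.modify p.2 [] (· ++ [p.1.1])) PySem.Dict.empty).getD n [] := by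
  have hR : (d.items.foldl (fun g p => g.modify p.2 [] (· ++ [p.1.1])) PySem.Dict.empty)
      = ((d.items.map (fun p => (p.2, p.1.1))).foldl (fun g q => g.modify q.1 [] (· ++ [q.2])) PySem.Dict.empty) := by
    rw [List.foldl_map]
  rw [hR, PySem.Dict.getD_foldl_modify_append]
  simp only [PySem.Dict.getD_empty, List.nil_append, List.filter_map, List.map_map]
  simp only [PySem.Dict.keys, List.foldl_map]
  have hL := PySem.List.foldl_congr_mem (l := d.items) (init := ([] : List String))
    (f := fun ts (p : (String × String) × String) => if some n == d.get? p.1 then ts ++ [p.1.1] else ts)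
    (g := fun ts (p : (String × String) × String) => if p.2 == n then ts ++ [p.1.1] else ts)
    (by intro acc p hp
        obtain ⟨k, v⟩ := p
        simp only []
        rw [PySem.Dict.get?_of_mem_items (d := d) hp hnd]
        by_cases hv : v = n
        · subst hv; simp
        · simp only [beq_iff_eq, Option.some.injEq]
          rw [if_neg (by simpa using fun h => hv h.symm), if_neg (by simpa using hv)])
  rw [hL, PySem.List.foldl_append_if]
  simp [Function.comp_def]

-- the two per-artist loop steps agree
lemma pv_step_eq (d : PySem.Dict (String × String) String) (hnd : d.keys.Nodup)
    (acc : PySem.Dict (String × String) (List String)) (artist : String × String) :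
    (let tracks := d.keys.foldl (fun ts track =>
        if some artist.1 == d.get? track then ts ++ [track.1] else ts) []
      if tracks.length > 0 then acc.insert artist tracks else acc)
      = (match (d.items.foldl (fun g p => g.modify p.2 [] (· ++ [p.1.1])) PySem.Dict.empty).get? artist.1 with
        | some tracks => if tracks.isEmpty then acc else acc.insert artist tracks
        | none => acc) := by
  simp only [pv_tracks_eq d hnd artist.1]
  rcases h : (d.items.foldl (fun g p => g.modify p.2 [] (· ++ [p.1.1])) PySem.Dict.empty).get? artist.1 with _ | ts
  · rw [h, PySem.Dict.getD_eq_get?_getD, h]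
    simp
  · rw [h, PySem.Dict.getD_eq_get?_getD, h]
    cases ts <;> simp

lemma pv_nodup_keys (top_tracks : List (String × String × String)) : (pvAsDict top_tracks).keys.Nodup := by
  exact PySem.Dict.nodup_keys_foldl_insert_key top_tracks (fun t => (t.1, t.2.1)) (fun d t => t.2.2) PySem.Dict.empty PySem.Dict.nodup_keys_empty

-- ===== VERDICT (by name: the statement is the Claim_ definition above) =====
theorem top_tracks_by_artist_spec : Claim_equal_top_tracks_by_artist := by
  intro tt tas _
  unfold Spec_top_tracks_by_artist top_tracks_by_artist top_tracks_by_artist_alt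
  have h := funext (fun acc => funext (pv_step_eq (pvAsDict tt) (pv_nodup_keys tt) acc))
  simp only [h]
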